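-- pv_equiv track=rewrite | github.com/bam0/ProjectEulerProblems | Problems_21-40/P36_Double_Base_Pals.py | base2_pal
-- ===== SOURCE A (Python) =====
-- def base2_pal(n, odd):
--     result = n
--     if odd:                               # If we want an odd pal, shift right
--         n >>= 1
--     while n > 0:
--         result = (result << 1) + (n & 1)  # Shift result left, add digit
--         n >>= 1                           # Shift n to the right
--     return result
-- ===== SOURCE B (Python) =====
-- def base2_pal(n, odd):
--     s = format(n, 'b')
--     mirror = s[-2::-1] if odd else s[::-1]
--     result = 0
--     for c in s + mirror:
--         result = 2 * result + (c == '1')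
--     return result
-- ===== Notes on version B (the rewrite author's own statement) =====
-- stated objective: idiomatic
-- what changed: Replaces A's bit-shift accumulation loop by the idiomatic string pipeline: format(n,'b'), mirror the digit string (dropping the middle digit in the odd case), and fold the palindrome string back to an integer.
-- outside the precondition, e.g. on base2_pal(-3, False): A returns -3, B returns 30; on base2_pal(-3, True): A returns -3, B returns 14
import Mathlib
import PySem

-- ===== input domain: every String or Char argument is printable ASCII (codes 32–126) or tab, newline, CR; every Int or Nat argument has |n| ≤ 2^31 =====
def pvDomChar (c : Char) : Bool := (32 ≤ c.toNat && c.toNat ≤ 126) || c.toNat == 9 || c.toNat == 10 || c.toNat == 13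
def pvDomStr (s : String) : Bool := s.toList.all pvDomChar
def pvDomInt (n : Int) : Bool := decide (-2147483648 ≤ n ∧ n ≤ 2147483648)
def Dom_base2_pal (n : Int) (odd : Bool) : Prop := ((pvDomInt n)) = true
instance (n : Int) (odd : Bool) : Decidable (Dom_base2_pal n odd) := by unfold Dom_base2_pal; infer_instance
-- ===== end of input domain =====

-- B replaces A's bit-shift accumulation loop by the idiomatic pipeline: binary digit string,
-- mirror it (dropping the middle digit in the odd case), fold back to an integer; same cost.


-- ===== PORT A =====
-- while n > 0: result = (result << 1) + (n & 1); n >>= 1   (Python << >> & are Lean <<< >>> / PySem.Int.band)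
def base2_palLoop (result n : Int) : Int :=
  if _h : 0 < n then
    base2_palLoop (result <<< (1 : Nat) + PySem.Int.band n 1) (n >>> (1 : Nat))
  else result
termination_by n.toNat
decreasing_by
  simp only [Int.shiftRight_eq_div_pow, pow_one]
  omega

def base2_pal (n : Int) (odd : Bool) : Int :=
  base2_palLoop n (if odd then n >>> (1 : Nat) else n)

-- ===== PORT B =====
-- s = format(n, 'b') is PySem.Int.toBinChars; s[::-1] is List.reverse and s[-2::-1] is
-- List.dropLast.reverse (exact for these slices on any string); the for-loop is a foldl.
def base2_palAltStep (result : Int) (c : Char) : Int :=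
  2 * result + (if c = '1' then 1 else 0)

def base2_pal_alt (n : Int) (odd : Bool) : Int :=
  let s := PySem.Int.toBinChars n
  let mirror := if odd then s.dropLast.reverse else s.reverse
  (s ++ mirror).foldl base2_palAltStep 0

-- ===== PRECONDITION & SPEC =====
-- Pre_ restricts to nonnegative n, the natural domain of a binary-palindrome builder: on
-- negative n A's loop never runs and it passes n through unchanged, while B folds over the
-- '-'-prefixed digit string — both values are accidents nobody would specify.
def Pre_base2_pal (n : Int) (odd : Bool) : Prop := 0 ≤ n
instance (n : Int) (odd : Bool) : Decidable (Pre_base2_pal n odd) := by unfold Pre_base2_pal; infer_instance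

def pvWitness_base2_pal : Int × Bool := (13, true)

def Spec_base2_pal (n : Int) (odd : Bool) (out : Int) : Prop := out = base2_pal_alt n odd
instance (n : Int) (odd : Bool) (out : Int) : Decidable (Spec_base2_pal n odd out) := by unfold Spec_base2_pal; infer_instance

-- ===== CLAIM (what is proved, stated in full; the proofs are below) =====
def Claim_equal_base2_pal : Prop := ∀ (n : Int) (odd : Bool), Dom_base2_pal n odd → Pre_base2_pal n odd → Spec_base2_pal n odd (base2_pal n odd)

-- ===== LEMMAS AND PROOFS =====

-- MSB-first binary digits of a natural number; empty for 0.
def pvBits : Nat → List Char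
  | 0 => []
  | (m + 1) =>
    pvBits ((m + 1) / 2) ++ [if (m + 1) % 2 = 1 then '1' else '0']
decreasing_by omega

lemma pvBits_pos (m : Nat) (hm : 0 < m) :
    pvBits m = pvBits (m / 2) ++ [if m % 2 = 1 then '1' else '0'] := by
  cases m with
  | zero => omega
  | succ k => rw [pvBits]

-- Nat.toDigits base 2 is pvBits (with '0' for 0).
lemma toDigitsCore_two (f : Nat) : ∀ (m : Nat) (l : List Char), m < f →
    Nat.toDigitsCore 2 f m l = (if m = 0 then ['0'] else pvBits m) ++ l := by
  induction f with
  | zero => intro m l h; omega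
  | succ f ih =>
    intro m l h
    simp only [Nat.toDigitsCore]
    by_cases h0 : m = 0
    · subst h0; norm_num [Nat.digitChar]
    · have hm : 0 < m := Nat.pos_of_ne_zero h0
      by_cases hq : m / 2 = 0
      · have h1 : m = 1 := by omega
        subst h1
        norm_num [pvBits_pos 1 (by omega), pvBits, Nat.digitChar]
      · rw [if_neg (by omega : ¬ m / 2 = 0), ih (m / 2) _ (by omega),
          if_neg hq, if_neg h0, pvBits_pos m hm]
        have hd : Nat.digitChar (m % 2) = (if m % 2 = 1 then '1' else '0') := by
          rcases Nat.mod_two_eq_zero_or_one m with h2 | h2 <;> simp [h2, Nat.digitChar]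
        rw [hd]
        simp

lemma toDigits_two (m : Nat) :
    Nat.toDigits 2 m = (if m = 0 then ['0'] else pvBits m) := by
  have := toDigitsCore_two (m + 1) m [] (by omega)
  simpa [Nat.toDigits] using this

lemma toBinChars_nonneg (n : Int) (h : 0 ≤ n) :
    PySem.Int.toBinChars n = (if n.toNat = 0 then ['0'] else pvBits n.toNat) := by
  rw [PySem.Int.toBinChars, if_neg (by omega : ¬ n < 0), toDigits_two]

-- value of the if-expression digit char
lemma pvBit_val (m : Nat) :
    (if (if m % 2 = 1 then '1' else '0') = '1' then (1 : Int) else 0) = ((m % 2 : Nat) : Int) := by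
  rcases Nat.mod_two_eq_zero_or_one m with h2 | h2 <;> simp [h2]

-- folding the digit list of m on top of accumulator a
lemma foldl_pvBits (m : Nat) : ∀ (a : Int),
    (pvBits m).foldl base2_palAltStep a = a * 2 ^ (pvBits m).length + m := by
  induction m using Nat.strong_induction_on with
  | _ m ih =>
    intro a
    by_cases h0 : m = 0
    · subst h0; simp [pvBits]
    · rw [pvBits_pos m (Nat.pos_of_ne_zero h0), List.foldl_append,
        ih (m / 2) (by omega) a]
      simp only [List.foldl_cons, List.foldl_nil, base2_palAltStep]
      rw [pvBit_val]
      simp only [List.length_append, List.length_cons, List.length_nil, pow_succ]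
      have hm' : (m : Int) = 2 * ((m / 2 : Nat) : Int) + ((m % 2 : Nat) : Int) := by
        push_cast; omega
      rw [hm']; ring

lemma foldl_pvBits_zero (m : Nat) : (pvBits m).foldl base2_palAltStep 0 = m := by
  simpa using foldl_pvBits m 0

-- A's loop consumes m LSB-first, i.e. folds the reversed digit list of m.
lemma base2_palLoop_eq (m : Nat) : ∀ (a : Int),
    base2_palLoop a (m : Int) = ((pvBits m).reverse).foldl base2_palAltStep a := by
  induction m using Nat.strong_induction_on with
  | _ m ih =>
    intro a
    by_cases h0 : m = 0
    · subst h0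
      rw [base2_palLoop]
      simp [pvBits]
    · have hm : 0 < m := Nat.pos_of_ne_zero h0
      rw [base2_palLoop, dif_pos (by exact_mod_cast hm)]
      have hshift : ((m : Int) >>> (1 : Nat)) = ((m / 2 : Nat) : Int) := by
        rw [Int.shiftRight_eq_div_pow, pow_one]; omega
      have hband : PySem.Int.band (m : Int) 1 = ((m % 2 : Nat) : Int) := by
        rw [PySem.Int.band_one]
        exact_mod_cast PySem.Int.mod_natCast m 2
      have hsl : (a <<< (1 : Nat)) = a * 2 := by
        rw [Int.shiftLeft_eq]; norm_num
      rw [hshift, hband, hsl, ih (m / 2) (by omega)]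
      rw [pvBits_pos m hm, List.reverse_append]
      simp only [List.reverse_singleton, List.singleton_append, List.foldl_cons]
      have : base2_palAltStep a (if m % 2 = 1 then '1' else '0')
          = a * 2 + ((m % 2 : Nat) : Int) := by
        simp only [base2_palAltStep]; rw [pvBit_val]; ring
      rw [this]

-- ===== VERDICT (by name: the statement is the Claim_ definition above) =====
theorem base2_pal_spec : Claim_equal_base2_pal := by
  intro n odd _ hpre
  obtain ⟨m, rfl⟩ : ∃ m : Nat, n = (m : Int) :=
    ⟨n.toNat, (Int.toNat_of_nonneg hpre).symm⟩
  unfold Spec_base2_pal base2_pal base2_pal_alt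
  rw [toBinChars_nonneg _ (Int.natCast_nonneg m)]
  simp only [Int.toNat_natCast]
  have hshift : ((m : Int) >>> (1 : Nat)) = ((m / 2 : Nat) : Int) := by
    rw [Int.shiftRight_eq_div_pow, pow_one]; omega
  cases odd with
  | false =>
    simp only [Bool.false_eq_true, if_false]
    by_cases h0 : m = 0
    · subst h0
      rw [if_pos rfl]
      rw [base2_palLoop]
      norm_num [base2_palAltStep]
      decide
    · rw [if_neg h0, List.foldl_append, foldl_pvBits_zero, base2_palLoop_eq m]
  | true =>
    simp only [if_true]
    rw [hshift]
    by_cases h0 : m = 0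
    · subst h0
      rw [if_pos rfl]
      norm_num
      rw [base2_palLoop]
      norm_num [base2_palAltStep]
      decide
    · rw [if_neg h0, List.foldl_append, foldl_pvBits_zero,
        base2_palLoop_eq (m / 2), pvBits_pos m (Nat.pos_of_ne_zero h0),
        List.dropLast_concat]
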